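-- pv_equiv track=rewrite | github.com/luhouyang/edunex_micromouse | src/houyang/MOUSE_MMS.py | get_surround
-- ===== SOURCE A (Python) =====
-- def get_surround(x, y, maze_state):
--     surrounding_cells = []
--
--     surrounding_cells.append([x, y + 1])  # north
--     surrounding_cells.append([x + 1, y])  # east
--     surrounding_cells.append([x, y - 1])  # south
--     surrounding_cells.append([x - 1, y])  # west
--
--     removed_cells = [
--         cell for cell in surrounding_cells
--         if (cell[0] < 0 or cell[0] > len(maze_state[0]) -
--             1 or cell[1] < 0 or cell[1] > len(maze_state) - 1)
--     ]
--
--     remaining_cell_index = {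
--         i: cell
--         for i, cell in enumerate(surrounding_cells)
--         if cell not in removed_cells
--     }
--
--     surrounding_cells = [
--         cell for cell in surrounding_cells if cell not in removed_cells
--     ]
--
--     return surrounding_cells, remaining_cell_index
-- ===== SOURCE B (Python) =====
-- def get_surround(x, y, maze_state):
--     w = len(maze_state[0])
--     h = len(maze_state)
--
--     def go(i, offs):
--         # recursion over the direction-offset table, building both results
--         # back-to-front by prepending
--         if not offs:
--             return [], {}
--         dx, dy = offs[0]
--         cells, idx = go(i + 1, offs[1:])
--         cx, cy = x + dx, y + dy
--         if 0 <= cx < w and 0 <= cy < h: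
--             return [[cx, cy]] + cells, {i: [cx, cy], **idx}
--         return cells, idx
--
--     return go(0, [(0, 1), (1, 0), (0, -1), (-1, 0)])
-- ===== Notes on version B (the rewrite author's own statement) =====
-- stated objective: alternative
-- what changed: Replaced A's staged pipeline (materialise four candidate cells, build a removed_cells exclusion list, then two membership-filter passes) by a structural recursion over a direction-offset table that tests bounds directly on the offset cell and builds the list and the index dict back-to-front by prepending.
import Mathlib
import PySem

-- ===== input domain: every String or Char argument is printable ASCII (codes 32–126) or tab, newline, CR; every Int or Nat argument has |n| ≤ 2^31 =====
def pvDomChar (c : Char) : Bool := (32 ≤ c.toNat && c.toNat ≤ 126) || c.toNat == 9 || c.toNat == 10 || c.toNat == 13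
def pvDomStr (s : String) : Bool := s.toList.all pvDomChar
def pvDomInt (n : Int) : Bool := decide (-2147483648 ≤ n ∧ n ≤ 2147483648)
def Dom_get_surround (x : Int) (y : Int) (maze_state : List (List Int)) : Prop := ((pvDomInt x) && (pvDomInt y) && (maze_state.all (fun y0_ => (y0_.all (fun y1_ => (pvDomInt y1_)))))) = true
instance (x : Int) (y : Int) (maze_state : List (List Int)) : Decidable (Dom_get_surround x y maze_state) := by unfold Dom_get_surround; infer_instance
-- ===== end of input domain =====

-- B replaces A's staged pipeline (candidate list, removed_cells exclusion list, two membership-filter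
-- passes) by a structural recursion over a direction-offset table with a direct bounds test,
-- building both results back-to-front by prepending.

-- ===== PORT A =====
def get_surround (x : Int) (y : Int) (maze_state : List (List Int)) : List (List Int) × (List (Int × List Int)) :=
  let surrounding_cells : List (List Int) := [[x, y + 1], [x + 1, y], [x, y - 1], [x - 1, y]]
  -- Python's maze_state[0] raises IndexError on the empty maze; Pre_get_surround excludes it
  let row0 : List Int := (PySem.List.pyGet? maze_state 0).getD []
  let removed_cells : List (List Int) := surrounding_cells.filter (fun cell =>
    decide (PySem.List.pyGetD cell 0 0 < 0 ∨ PySem.List.pyGetD cell 0 0 > (row0.length : Int) - 1 ∨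
            PySem.List.pyGetD cell 1 0 < 0 ∨ PySem.List.pyGetD cell 1 0 > (maze_state.length : Int) - 1))
  let remaining_cell_index : List (Int × List Int) :=
    (PySem.List.enumerate surrounding_cells 0).filter (fun p => decide (p.2 ∉ removed_cells))
  let surrounding_cells2 : List (List Int) := surrounding_cells.filter (fun cell => decide (cell ∉ removed_cells))
  (surrounding_cells2, remaining_cell_index)

-- ===== PORT B =====
-- the inner recursive helper 'go' of Source B: recursion over the offset table, prepending results
def gsGo (x y w h : Int) (i : Int) : List (Int × Int) → List (List Int) × (List (Int × List Int))
  | [] => ([], [])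
  | d :: rest =>
    let r := gsGo x y w h (i + 1) rest
    let cx := x + d.1
    let cy := y + d.2
    if 0 ≤ cx ∧ cx < w ∧ 0 ≤ cy ∧ cy < h then
      ([cx, cy] :: r.1, (i, [cx, cy]) :: r.2)
    else r

def get_surround_alt (x : Int) (y : Int) (maze_state : List (List Int)) : List (List Int) × (List (Int × List Int)) :=
  -- Python's maze_state[0] raises IndexError on the empty maze; Pre_get_surround excludes it
  let w : Int := ((PySem.List.pyGet? maze_state 0).getD []).length
  let h : Int := maze_state.length
  gsGo x y w h 0 [(0, 1), (1, 0), (0, -1), (-1, 0)]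

-- ===== PRECONDITION & SPEC =====
-- Pre_ excludes only the empty maze, on which Python A raises IndexError at maze_state[0].
def Pre_get_surround (_x : Int) (_y : Int) (maze_state : List (List Int)) : Prop := maze_state ≠ []
instance (x : Int) (y : Int) (maze_state : List (List Int)) : Decidable (Pre_get_surround x y maze_state) := by unfold Pre_get_surround; infer_instance
def pvWitness_get_surround : Int × Int × List (List Int) := (1, 1, [[0, 0, 0], [0, 0, 0], [0, 0, 0]])

def Spec_get_surround (x : Int) (y : Int) (maze_state : List (List Int)) (out : List (List Int) × (List (Int × List Int))) : Prop := out = get_surround_alt x y maze_state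
instance (x : Int) (y : Int) (maze_state : List (List Int)) (out : List (List Int) × (List (Int × List Int))) : Decidable (Spec_get_surround x y maze_state out) := by unfold Spec_get_surround; infer_instance

-- ===== CLAIM (what is proved, stated in full; the proofs are below) =====
def Claim_equal_get_surround : Prop := ∀ (x : Int) (y : Int) (maze_state : List (List Int)), Dom_get_surround x y maze_state → Pre_get_surround x y maze_state → Spec_get_surround x y maze_state (get_surround x y maze_state)

-- ===== LEMMAS AND PROOFS =====

-- Core: over pure integers w h, A's filter pipeline equals B's recursion over the offset table.
set_option maxHeartbeats 1000000 in
theorem pv_core (x y w h : Int) :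
    (([[x, y + 1], [x + 1, y], [x, y - 1], [x - 1, y]] : List (List Int)).filter
        (fun cell => decide (cell ∉ ([[x, y + 1], [x + 1, y], [x, y - 1], [x - 1, y]] : List (List Int)).filter
          (fun cell => decide (PySem.List.pyGetD cell 0 0 < 0 ∨ PySem.List.pyGetD cell 0 0 > w - 1 ∨
               PySem.List.pyGetD cell 1 0 < 0 ∨ PySem.List.pyGetD cell 1 0 > h - 1)))),
     (PySem.List.enumerate ([[x, y + 1], [x + 1, y], [x, y - 1], [x - 1, y]] : List (List Int)) 0).filter
        (fun p => decide (p.2 ∉ ([[x, y + 1], [x + 1, y], [x, y - 1], [x - 1, y]] : List (List Int)).filter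
          (fun cell => decide (PySem.List.pyGetD cell 0 0 < 0 ∨ PySem.List.pyGetD cell 0 0 > w - 1 ∨
               PySem.List.pyGetD cell 1 0 < 0 ∨ PySem.List.pyGetD cell 1 0 > h - 1)))))
    = gsGo x y w h 0 [(0, 1), (1, 0), (0, -1), (-1, 0)] := by
  set cand : List (List Int) := [[x, y + 1], [x + 1, y], [x, y - 1], [x - 1, y]] with hcand
  set removed : List (List Int) := cand.filter
      (fun cell => decide (PySem.List.pyGetD cell 0 0 < 0 ∨ PySem.List.pyGetD cell 0 0 > w - 1 ∨
               PySem.List.pyGetD cell 1 0 < 0 ∨ PySem.List.pyGetD cell 1 0 > h - 1)) with hrem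
  have g1 : ∀ a b : Int, PySem.List.pyGetD [a, b] 0 (0 : Int) = a := fun a b => by
    simp [PySem.List.pyGetD]
  have g2 : ∀ a b : Int, PySem.List.pyGetD [a, b] 1 (0 : Int) = b := fun a b => by
    simp [PySem.List.pyGetD]
  have hmem : ∀ c, c ∈ cand → (decide (c ∉ removed)) =
      decide (0 ≤ PySem.List.pyGetD c 0 0 ∧ PySem.List.pyGetD c 0 0 < w ∧
              0 ≤ PySem.List.pyGetD c 1 0 ∧ PySem.List.pyGetD c 1 0 < h) := by
    intro c hc
    rw [decide_eq_decide]
    rw [hrem]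
    simp only [List.mem_filter, hc, true_and, decide_eq_true_eq]
    omega
  have e1 : cand.filter (fun c => decide (c ∉ removed)) =
      cand.filter (fun c => decide (0 ≤ PySem.List.pyGetD c 0 0 ∧ PySem.List.pyGetD c 0 0 < w ∧
              0 ≤ PySem.List.pyGetD c 1 0 ∧ PySem.List.pyGetD c 1 0 < h)) :=
    List.filter_congr hmem
  have e2 : (PySem.List.enumerate cand 0).filter (fun p => decide (p.2 ∉ removed)) =
      (PySem.List.enumerate cand 0).filter (fun p =>
        decide (0 ≤ PySem.List.pyGetD p.2 0 0 ∧ PySem.List.pyGetD p.2 0 0 < w ∧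
              0 ≤ PySem.List.pyGetD p.2 1 0 ∧ PySem.List.pyGetD p.2 1 0 < h)) := by
    apply List.filter_congr
    intro p hp
    apply hmem
    rw [hcand] at hp
    simp only [PySem.List.enumerate_cons, PySem.List.enumerate_nil] at hp
    simp only [List.mem_cons, List.not_mem_nil, or_false] at hp
    rcases hp with h | h | h | h <;> rw [h] <;> simp [hcand]
  rw [e1, e2, hcand]
  simp only [PySem.List.enumerate_cons, PySem.List.enumerate_nil, List.filter_cons,
    List.filter_nil, gsGo]
  simp only [g1, g2, decide_eq_true_eq, add_zero, ← sub_eq_add_neg]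
  split_ifs <;> rfl

theorem get_surround_eq (x : Int) (y : Int) (maze_state : List (List Int))
    (_hpre : maze_state ≠ []) : get_surround x y maze_state = get_surround_alt x y maze_state := by
  simpa only [get_surround, get_surround_alt] using
    pv_core x y ((((PySem.List.pyGet? maze_state 0).getD []).length : Int)) ((maze_state.length : Int))

-- ===== VERDICT (by name: the statement is the Claim_ definition above) =====
theorem get_surround_spec : Claim_equal_get_surround := by
  intro x y ms _ hpre
  exact get_surround_eq x y ms hpre
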